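-- pv_equiv track=rewrite | github.com/IvanKalug-QA/codewars | Musical_Pitch_Classes.py | pitch_class
-- ===== SOURCE A (Python) =====
-- def pitch_class(note: str) -> int | None:
--     base_values = {
--         'C': 0,
--         'D': 2,
--         'E': 4,
--         'F': 5,
--         'G': 7,
--         'A': 9,
--         'B': 11
--     }
--     if not note or len(note) == 0:
--         return None
--     letter = note[0].upper()
--     if letter not in base_values:
--         return None
--     value = base_values[letter]
--     for modifier in note[1:]:
--         if modifier == '#':
--             value += 1
--         elif modifier == 'b':
--             value -= 1
--         else:
--             return None
--     value %= 12
--     return value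
-- ===== SOURCE B (Python) =====
-- def pitch_class(note: str) -> int | None:
--     base_values = {'C': 0, 'D': 2, 'E': 4, 'F': 5, 'G': 7, 'A': 9, 'B': 11}
--     if not note:
--         return None
--     base = base_values.get(note[0].upper())
--     if base is None:
--         return None
--     rest = note[1:]
--     sharps = rest.count('#')
--     flats = rest.count('b')
--     if sharps + flats != len(rest):
--         return None
--     return (base + sharps - flats) % 12
-- ===== Notes on version B (the rewrite author's own statement) =====
-- stated objective: simpler
-- what changed: Replaces the accumulating/validating character loop with a count-then-validate decomposition: count the sharp and flat modifiers in the tail, reject the note if they do not cover the whole tail, and compute the result with one arithmetic expression.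
import Mathlib
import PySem

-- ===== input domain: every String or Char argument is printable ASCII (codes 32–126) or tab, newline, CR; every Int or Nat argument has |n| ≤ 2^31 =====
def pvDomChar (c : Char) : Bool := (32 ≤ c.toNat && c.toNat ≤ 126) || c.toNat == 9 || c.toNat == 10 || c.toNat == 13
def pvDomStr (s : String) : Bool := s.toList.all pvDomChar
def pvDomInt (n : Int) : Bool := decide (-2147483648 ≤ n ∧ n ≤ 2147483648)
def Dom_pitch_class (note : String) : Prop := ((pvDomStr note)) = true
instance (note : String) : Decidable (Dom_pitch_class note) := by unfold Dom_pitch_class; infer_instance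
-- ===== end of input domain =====

-- B replaces A's accumulating/validating loop by counting '#' and 'b' in the tail,
-- validating via the length, and one arithmetic expression (objective: simpler).

-- ===== PORT A =====
def pvBaseValues : PySem.Dict Char Int :=
  PySem.Dict.ofList [('C', 0), ('D', 2), ('E', 4), ('F', 5), ('G', 7), ('A', 9), ('B', 11)]

-- the 'for modifier in note[1:]' loop with its early 'return None'
def pvModLoop : List Char → Int → Option Int
  | [], value => some value
  | c :: rest, value =>
      if c = '#' then pvModLoop rest (value + 1)
      else if c = 'b' then pvModLoop rest (value - 1)
      else none

def pitch_class (note : String) : Option Int :=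
  match note.toList with
  | [] => none
  | c :: rest =>
    let letter := PySem.Chars.upperChar c   -- note[0].upper(), exact on ASCII single char
    match pvBaseValues.get? letter with
    | none => none          -- letter not in base_values
    | some value =>
      match pvModLoop rest value with
      | none => none
      | some v => some (PySem.Int.mod v 12)   -- value %= 12

-- ===== PORT B =====
def pitch_class_alt (note : String) : Option Int :=
  match note.toList with
  | [] => none
  | c :: rest =>
    match pvBaseValues.get? (PySem.Chars.upperChar c) with   -- base_values.get(note[0].upper())
    | none => none
    | some base =>
      let sharps := rest.count '#'
      let flats := rest.count 'b'
      if sharps + flats ≠ rest.length then none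
      else some (PySem.Int.mod (base + (sharps : Int) - (flats : Int)) 12)

-- ===== PRECONDITION & SPEC =====
def Spec_pitch_class (note : String) (out : Option Int) : Prop := out = pitch_class_alt note
instance (note : String) (out : Option Int) : Decidable (Spec_pitch_class note out) := by unfold Spec_pitch_class; infer_instance

-- ===== CLAIM (what is proved, stated in full; the proofs are below) =====
def Claim_equal_pitch_class : Prop := ∀ (note : String), Dom_pitch_class note → Spec_pitch_class note (pitch_class note)

-- ===== LEMMAS AND PROOFS =====
theorem pvCountTwo_le (a b : Char) (hab : a ≠ b) (l : List Char) :
    l.count a + l.count b ≤ l.length := by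
  induction l with
  | nil => simp
  | cons c t ih =>
    simp only [List.count_cons, List.length_cons]
    split_ifs with hca hcb
    · exact absurd ((eq_of_beq hca).symm.trans (eq_of_beq hcb)) hab
    · omega
    · omega
    · omega

theorem pvModLoop_eq (rest : List Char) (value : Int) :
    pvModLoop rest value =
      if rest.count '#' + rest.count 'b' = rest.length
      then some (value + (rest.count '#' : Int) - (rest.count 'b' : Int))
      else none := by
  induction rest generalizing value with
  | nil => simp [pvModLoop]
  | cons c t ih =>
    simp only [pvModLoop]
    by_cases h1 : c = '#'
    · subst h1
      rw [if_pos rfl, ih]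
      simp only [List.count_cons, List.length_cons]
      by_cases hA : t.count '#' + t.count 'b' = t.length
      · rw [if_pos hA, if_pos (by simp; omega)]
        congr 1
        simp
        omega
      · rw [if_neg hA, if_neg (by simp; omega)]
    · by_cases h2 : c = 'b'
      · subst h2
        rw [if_neg (by decide), if_pos rfl, ih]
        simp only [List.count_cons, List.length_cons]
        by_cases hA : t.count '#' + t.count 'b' = t.length
        · rw [if_pos hA, if_pos (by simp; omega)]
          congr 1
          simp
          omega
        · rw [if_neg hA, if_neg (by simp; omega)]
      · rw [if_neg h1, if_neg h2]
        have hsum := pvCountTwo_le '#' 'b' (by decide) t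
        have e1 : List.count '#' (c :: t) = List.count '#' t := by
          simp [h1]
        have e2 : List.count 'b' (c :: t) = List.count 'b' t := by
          simp [h2]
        rw [if_neg (by rw [e1, e2, List.length_cons]; omega)]

-- ===== VERDICT (by name: the statement is the Claim_ definition above) =====
theorem pitch_class_spec : Claim_equal_pitch_class := by
  intro note _
  unfold Spec_pitch_class pitch_class pitch_class_alt
  cases note.toList with
  | nil => rfl
  | cons c rest =>
    cases hb : pvBaseValues.get? (PySem.Chars.upperChar c) with
    | none => simp only [hb]
    | some base =>
      simp only [hb, pvModLoop_eq]
      by_cases h : rest.count '#' + rest.count 'b' = rest.length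
      · simp [h]
      · simp [h]
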